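-- pv_equiv track=rewrite | github.com/collinsakenga/codewars_solutions | 5 kyu/5 kyu_ASCII85 Encoding & Decoding.py | ascii85
-- ===== SOURCE A (Python) =====
-- def ascii85(num, check):
--     if num.count("0") == 32 and check != 0:
--         return [122]
--     num = int(num, 2)
--     arr = []
--     index = 4
--     while index >= 0:
--         arr.append(num//85**index+33)
--         num -= num//85**index*85**index
--         index -= 1
--     return arr
-- ===== SOURCE B (Python) =====
-- def ascii85(num, check):
--     if num.count("0") == 32 and check != 0:
--         return [122]
--     n = int(num, 2)
--     digits = []
--     for _ in range(5):
--         n, rem = divmod(n, 85)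
--         digits.append(rem + 33)
--     digits.reverse()
--     return digits
-- ===== Notes on version B (the rewrite author's own statement) =====
-- stated objective: simpler
-- what changed: Replaced the MSB-first 'divide by precomputed powers 85**index and subtract' while-loop with a plain LSB-first repeated-divmod loop (5 iterations of n, rem = divmod(n, 85)) followed by a reverse, so no power table or subtraction chain is needed; Pre_ keeps the natural domain of 32-bit groups: strings int(num,2) accepts with value in [0, 85^5).
-- outside the precondition, e.g. on ascii85('-1', 0): A returns [32, 117, 117, 117, 117], B returns [117, 117, 117, 117, 117]; on ascii85('abc', 0): A raises ValueError, B raises ValueError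
import Mathlib
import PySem

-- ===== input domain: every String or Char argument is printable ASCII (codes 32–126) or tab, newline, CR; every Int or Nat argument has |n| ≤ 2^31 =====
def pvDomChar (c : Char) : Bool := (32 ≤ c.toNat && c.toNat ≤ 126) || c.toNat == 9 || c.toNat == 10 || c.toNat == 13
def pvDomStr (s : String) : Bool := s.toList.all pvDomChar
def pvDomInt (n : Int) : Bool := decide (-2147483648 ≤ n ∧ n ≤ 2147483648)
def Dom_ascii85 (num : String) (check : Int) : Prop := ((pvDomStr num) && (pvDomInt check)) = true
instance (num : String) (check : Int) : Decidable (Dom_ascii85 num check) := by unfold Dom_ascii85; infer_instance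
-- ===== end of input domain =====

-- B replaces A's MSB-first power-and-subtract loop with an LSB-first repeated-divmod loop plus a reverse (simpler; return value only).

-- ===== PORT A =====
-- while index >= 0: arr.append(num//85**index+33); num -= num//85**index*85**index; index -= 1
def ascii85LoopA (fuel : Nat) (num : Int) (index : Int) (arr : List Int) : List Int :=
  match fuel with
  | 0 => arr
  | f + 1 =>
    if index ≥ 0 then
      let arr' := arr ++ [PySem.Int.floordiv num (85 ^ index.toNat) + 33]
      let num' := num - PySem.Int.floordiv num (85 ^ index.toNat) * 85 ^ index.toNat
      ascii85LoopA f num' (index - 1) arr'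
    else arr

def ascii85 (num : String) (check : Int) : List Int :=
  if PySem.Str.count num "0" = 32 ∧ check ≠ 0 then [122]
  else
    let n := (PySem.Int.ofStrBase? num 2).getD 0   -- int(num, 2); Pre_ excludes ValueError
    ascii85LoopA 6 n 4 []

-- ===== PORT B =====
def ascii85_alt (num : String) (check : Int) : List Int :=
  if PySem.Str.count num "0" = 32 ∧ check ≠ 0 then [122]
  else
    let n := (PySem.Int.ofStrBase? num 2).getD 0   -- int(num, 2); Pre_ excludes ValueError
    let st := (PySem.List.pyRange 0 5 1).foldl
      (fun (st : Int × List Int) _ =>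
        let qr := (PySem.Int.divmod? st.1 85).getD (0, 0)
        (qr.1, st.2 ++ [qr.2 + 33]))
      (n, [])
    st.2.reverse

-- ===== PRECONDITION & SPEC =====
-- Pre_ excludes strings int(num,2) rejects (ValueError in both programs) and, beyond the natural
-- 32-bit-group domain, strings whose parsed value is negative or ≥ 85^5: there A returns digit lists
-- that are not a base-85 encoding (out-of-range or floor-division-of-negative digits) and B's divmod
-- digits differ from them.
def Pre_ascii85 (num : String) (check : Int) : Prop :=
  (PySem.Int.ofStrBase? num 2).isSome ∧
  0 ≤ (PySem.Int.ofStrBase? num 2).getD 0 ∧ (PySem.Int.ofStrBase? num 2).getD 0 < 4437053125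
instance (num : String) (check : Int) : Decidable (Pre_ascii85 num check) := by unfold Pre_ascii85; infer_instance

def pvWitness_ascii85 : String × Int := ("101", 0)

def Spec_ascii85 (num : String) (check : Int) (out : List Int) : Prop := out = ascii85_alt num check
instance (num : String) (check : Int) (out : List Int) : Decidable (Spec_ascii85 num check out) := by unfold Spec_ascii85; infer_instance

-- ===== CLAIM (what is proved, stated in full; the proofs are below) =====
def Claim_equal_ascii85 : Prop := ∀ (num : String) (check : Int), Dom_ascii85 num check → Pre_ascii85 num check → Spec_ascii85 num check (ascii85 num check)

-- ===== LEMMAS AND PROOFS =====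

-- A's side fully unrolled for 0 ≤ n (the subtraction chain leaves n % 85^index behind).
theorem ascii85LoopA_eq (n : Int) (_h0 : 0 ≤ n) :
    ascii85LoopA 6 n 4 [] =
      [n / 52200625 + 33, n % 52200625 / 614125 + 33, n % 614125 / 7225 + 33,
       n % 7225 / 85 + 33, n % 85 + 33] := by
  norm_num [ascii85LoopA, PySem.Int.floordiv_eq_ediv_of_pos]
  simp only [show ((85:Int) ^ (4:Int).toNat) = 52200625 from by decide,
             show ((85:Int) ^ (3:Int).toNat) = 614125 from by decide,
             show ((85:Int) ^ (2:Int).toNat) = 7225 from by decide]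
  have e4 : n - n / 52200625 * 52200625 = n % 52200625 := by omega
  rw [e4]
  have e3 : n % 52200625 - n % 52200625 / 614125 * 614125 = n % 614125 := by
    have := Int.emod_emod_of_dvd n (show (614125:Int) ∣ 52200625 by norm_num)
    omega
  rw [e3]
  have e2 : n % 614125 - n % 614125 / 7225 * 7225 = n % 7225 := by
    have := Int.emod_emod_of_dvd n (show (7225:Int) ∣ 614125 by norm_num)
    omega
  rw [e2]
  have e1 : n % 7225 - n % 7225 / 85 * 85 = n % 85 := by
    have := Int.emod_emod_of_dvd n (show (85:Int) ∣ 7225 by norm_num)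
    omega
  rw [e1]
  simp

-- B's side fully unrolled for 0 ≤ n.
theorem ascii85AltLoop_eq (n : Int) (h0 : 0 ≤ n) (h1 : n < 4437053125) :
    ((PySem.List.pyRange 0 5 1).foldl
      (fun (st : Int × List Int) _ =>
        let qr := (PySem.Int.divmod? st.1 85).getD (0, 0)
        (qr.1, st.2 ++ [qr.2 + 33])) (n, [])).2.reverse =
      [n / 614125 / 85 + 33, n / 614125 % 85 + 33, n / 7225 % 85 + 33,
       n / 85 % 85 + 33, n % 85 + 33] := by
  have hr : PySem.List.pyRange 0 5 1 = [0, 1, 2, 3, 4] := by decide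
  rw [hr]
  simp only [List.foldl]
  norm_num [PySem.Int.divmod?, PySem.Int.floordiv?, PySem.Int.mod?,
            PySem.Int.floordiv_eq_ediv_of_pos, PySem.Int.mod_eq_emod_of_pos]
  have hd : ∀ a : Int, a.fdiv 85 = a / 85 := fun a => Int.fdiv_eq_ediv_of_nonneg a (by norm_num)
  have hm : ∀ a : Int, a.fmod 85 = a % 85 := fun a => by simp [Int.fmod_eq_emod]
  simp only [hd, hm]
  have d2 : ∀ a : Int, a / 85 / 85 = a / 7225 := fun a => by
    rw [Int.ediv_ediv_of_nonneg (show (0:Int) ≤ 85 by norm_num)]; norm_num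
  have d3 : n / 7225 / 85 = n / 614125 := by
    rw [Int.ediv_ediv_of_nonneg (show (0:Int) ≤ 7225 by norm_num)]; norm_num
  have d4 : n / 614125 / 85 = n / 52200625 := by
    rw [Int.ediv_ediv_of_nonneg (show (0:Int) ≤ 614125 by norm_num)]; norm_num
  rw [d2 n, d3, d4]
  refine ⟨by omega, rfl, rfl, trivial, trivial⟩

-- ===== VERDICT (by name: the statement is the Claim_ definition above) =====
theorem ascii85_spec : Claim_equal_ascii85 := by
  intro num check _hdom hpre
  unfold Spec_ascii85 ascii85 ascii85_alt
  split
  · rfl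
  · simp only []
    unfold Pre_ascii85 at hpre
    obtain ⟨-, h0, h1⟩ := hpre
    set n := (PySem.Int.ofStrBase? num 2).getD 0 with hn
    rw [ascii85LoopA_eq n h0, ascii85AltLoop_eq n h0 h1]
    have e1 : n / 52200625 = n / 614125 / 85 := by omega
    have e2 : n % 52200625 / 614125 = n / 614125 % 85 := by omega
    have e3 : n % 614125 / 7225 = n / 7225 % 85 := by omega
    have e4 : n % 7225 / 85 = n / 85 % 85 := by omega
    rw [e1, e2, e3, e4]
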